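-- pv_equiv track=rewrite | github.com/ceoeventontology/CEOEventOntology | open_utilities.py | _shift_indices_for_empty_strings
-- ===== SOURCE A (Python) =====
-- def _shift_indices_for_empty_strings(words, indices):
--     shiftleft = 0
--     new_indices = []
--     new_words = []
--     for idx, word in enumerate(words):
--         if word=="" or word.isspace():
--             shiftleft += 1
--         else:
--             if idx in indices:
--                 new_indices.append(idx-shiftleft)
--             new_words.append(word)
--     return new_words, new_indices
-- ===== SOURCE B (Python) =====
-- def _shift_indices_for_empty_strings(words, indices):
--     # Explicit compacted table: surviving words paired with their original
--     # positions; new indices come from the enumeration counter of that table.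
--     kept = [(idx, word) for idx, word in enumerate(words)
--             if not (word == "" or word.isspace())]
--     new_words = [word for _, word in kept]
--     new_indices = [new_pos for new_pos, (old_idx, _) in enumerate(kept)
--                    if old_idx in indices]
--     return new_words, new_indices
-- ===== Notes on version B (the rewrite author's own statement) =====
-- stated objective: alternative
-- what changed: Replaces the single loop with a running shift counter and conditional appends by building an explicit kept-table of (original position, word) pairs, deriving new_words by projection and new_indices from the enumeration counter of the kept table instead of idx-minus-shift arithmetic.
import Mathlib
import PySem

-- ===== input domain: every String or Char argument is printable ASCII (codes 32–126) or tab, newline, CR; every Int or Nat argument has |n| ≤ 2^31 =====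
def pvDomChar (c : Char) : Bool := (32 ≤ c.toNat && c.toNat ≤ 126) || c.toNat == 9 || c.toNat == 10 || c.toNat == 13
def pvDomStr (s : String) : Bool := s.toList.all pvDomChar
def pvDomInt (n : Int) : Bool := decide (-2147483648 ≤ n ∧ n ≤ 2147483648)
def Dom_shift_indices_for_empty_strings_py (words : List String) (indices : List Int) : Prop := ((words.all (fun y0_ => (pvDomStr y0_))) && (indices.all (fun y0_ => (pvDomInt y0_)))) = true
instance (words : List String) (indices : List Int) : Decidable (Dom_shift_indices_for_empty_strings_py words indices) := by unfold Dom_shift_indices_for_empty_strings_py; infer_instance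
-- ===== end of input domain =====

-- B replaces A’s running shift counter with an explicit kept-(index, word) table whose enumeration counter yields the new positions; an alternative decomposition, same cost.

-- ===== PORT A =====
-- A: one loop over enumerate(words) keeping (shiftleft, new_indices, new_words) as mutable state.
def shift_indices_for_empty_strings_py (words : List String) (indices : List Int) : List String × List Int :=
  let st := (PySem.List.enumerate words 0).foldl
    (fun (acc : Int × List Int × List String) p =>
      if p.2 == "" || PySem.Str.strIsspace p.2 then
        (acc.1 + 1, acc.2.1, acc.2.2)
      else
        (acc.1,
         (if indices.contains p.1 then acc.2.1 ++ [p.1 - acc.1] else acc.2.1),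
         acc.2.2 ++ [p.2]))
    (0, [], [])
  (st.2.2, st.2.1)

-- ===== PORT B =====
-- B: explicit kept-table of (original index, word); new positions from enumerating the table.
def shift_indices_for_empty_strings_py_alt (words : List String) (indices : List Int) : List String × List Int :=
  let kept := (PySem.List.enumerate words 0).filter
    (fun p => !(p.2 == "" || PySem.Str.strIsspace p.2))
  let new_words := kept.map (fun p => p.2)
  let new_indices := (PySem.List.enumerate kept 0).filterMap
    (fun q => if indices.contains q.2.1 then some q.1 else none)
  (new_words, new_indices)

-- ===== PRECONDITION & SPEC =====

def Spec_shift_indices_for_empty_strings_py (words : List String) (indices : List Int) (out : List String × List Int) : Prop := out = shift_indices_for_empty_strings_py_alt words indices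
instance (words : List String) (indices : List Int) (out : List String × List Int) : Decidable (Spec_shift_indices_for_empty_strings_py words indices out) := by unfold Spec_shift_indices_for_empty_strings_py; infer_instance

-- ===== CLAIM (what is proved, stated in full; the proofs are below) =====
def Claim_equal_shift_indices_for_empty_strings_py : Prop := ∀ (words : List String) (indices : List Int), Dom_shift_indices_for_empty_strings_py words indices → Spec_shift_indices_for_empty_strings_py words indices (shift_indices_for_empty_strings_py words indices)

-- ===== LEMMAS AND PROOFS =====

-- blank w: the dropped-word test
def pvBlank (w : String) : Bool := w == "" || PySem.Str.strIsspace w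

-- The index list A emits, as a structural function of the word list, start index s and shift sl.
def pvG (indices : List Int) : List String → Int → Int → List Int
  | [], _, _ => []
  | w :: ws, s, sl =>
    if pvBlank w then pvG indices ws (s + 1) (sl + 1)
    else (if indices.contains s then [s - sl] else []) ++ pvG indices ws (s + 1) sl

def pvW : List String → List String
  | [] => []
  | w :: ws => if pvBlank w then pvW ws else w :: pvW ws

lemma pvA_fold (indices : List Int) (words : List String) :
    ∀ (s sl : Int) (ni : List Int) (nw : List String),
    (PySem.List.enumerate words s).foldl
      (fun (acc : Int × List Int × List String) p =>
        if p.2 == "" || PySem.Str.strIsspace p.2 then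
          (acc.1 + 1, acc.2.1, acc.2.2)
        else
          (acc.1,
           (if indices.contains p.1 then acc.2.1 ++ [p.1 - acc.1] else acc.2.1),
           acc.2.2 ++ [p.2]))
      (sl, ni, nw)
    = (sl + ((words.filter pvBlank).length : Int), ni ++ pvG indices words s sl, nw ++ pvW words) := by
  induction words with
  | nil => intro s sl ni nw; simp [PySem.List.enumerate_nil, pvG, pvW]
  | cons w ws ih =>
    intro s sl ni nw
    rw [PySem.List.enumerate_cons]
    simp only [List.foldl_cons]
    by_cases hb : pvBlank w
    · have hb' : (w == "" || PySem.Str.strIsspace w) = true := hb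
      simp only [hb', if_true, List.filter_cons, pvG, pvW, hb, ih, List.length_cons,
        Prod.mk.injEq]
      exact ⟨by push_cast; ring, trivial⟩
    · have hb' : (w == "" || PySem.Str.strIsspace w) = false := by
        simpa [pvBlank] using hb
      simp only [hb', Bool.false_eq_true, if_false, List.filter_cons, pvG, pvW, hb, ih]
      simp only [Prod.mk.injEq]
      refine ⟨by trivial, by split_ifs <;> simp, by simp⟩

-- B's filterMap over the enumerated kept table equals pvG with shift s - t.
lemma pvB_idx (indices : List Int) (words : List String) :
    ∀ (s t : Int),
    (PySem.List.enumerate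
        ((PySem.List.enumerate words s).filter
          (fun p => !(p.2 == "" || PySem.Str.strIsspace p.2))) t).filterMap
      (fun q => if indices.contains q.2.1 then some q.1 else none)
    = pvG indices words s (s - t) := by
  induction words with
  | nil => intro s t; simp [PySem.List.enumerate_nil, pvG]
  | cons w ws ih =>
    intro s t
    rw [PySem.List.enumerate_cons]
    by_cases hb : pvBlank w
    · have hb' : (w == "" || PySem.Str.strIsspace w) = true := hb
      simp only [List.filter_cons, hb', Bool.not_true, Bool.false_eq_true, if_false, pvG, hb]
      have h2 := ih (s + 1) t
      have harith : s + 1 - t = s - t + 1 := by ring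
      rw [harith] at h2
      exact h2
    · have hb' : (w == "" || PySem.Str.strIsspace w) = false := by
        simpa [pvBlank] using hb
      simp only [List.filter_cons, hb', Bool.not_false, if_true, pvG, hb, Bool.false_eq_true,
        if_false]
      rw [PySem.List.enumerate_cons]
      simp only [List.filterMap_cons]
      have := ih (s + 1) (t + 1)
      have harith : s + 1 - (t + 1) = s - t := by ring
      rw [harith] at this
      rw [this]
      have harith2 : s - (s - t) = t := by ring
      rw [harith2]
      by_cases hm : s ∈ indices <;> simp [hm]

lemma pvB_words (words : List String) :
    ∀ (s : Int),
    ((PySem.List.enumerate words s).filter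
        (fun p => !(p.2 == "" || PySem.Str.strIsspace p.2))).map (fun p => p.2)
    = pvW words := by
  induction words with
  | nil => intro s; simp [PySem.List.enumerate_nil, pvW]
  | cons w ws ih =>
    intro s
    rw [PySem.List.enumerate_cons]
    by_cases hb : pvBlank w
    · have hb' : (w == "" || PySem.Str.strIsspace w) = true := hb
      simp only [List.filter_cons, hb', Bool.not_true, Bool.false_eq_true, if_false, if_true,
        pvW, hb, ih]
    · have hb' : (w == "" || PySem.Str.strIsspace w) = false := by
        simpa [pvBlank] using hb
      simp only [List.filter_cons, hb', Bool.not_false, if_true, pvW, hb, Bool.false_eq_true,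
        if_false, List.map_cons, ih]

-- ===== VERDICT =====
theorem shift_indices_for_empty_strings_py_spec : Claim_equal_shift_indices_for_empty_strings_py := by
  intro words indices _
  unfold Spec_shift_indices_for_empty_strings_py
  unfold shift_indices_for_empty_strings_py shift_indices_for_empty_strings_py_alt
  simp only [pvA_fold indices words, pvB_idx indices words, pvB_words words]
  simp
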